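-- pv_equiv track=rewrite | github.com/IwonskiI/Algorithm_Study | Programmers/코딩 기초 트레이닝(Lv.0)/Day17/특정 문자열로 끝나는 가장/특정 문자열로 끝나는 가장.py | solution
-- ===== SOURCE A (Python) =====
-- def solution(myString, pat):
--     answer = ''
--     ptlen = len(pat)
--
--     for i in range(len(myString)-1,0,-1):
--         if pat[-1] == myString[i]:
--             if myString[i-ptlen+1:i+1] == pat:
--                 answer = myString[:i+1]
--                 break
--
--     return answer
-- ===== SOURCE B (Python) =====
-- def solution(myString, pat):
--     m = len(pat)
--     if m == 0:
--         return ''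
--     # KMP failure function: fail[i] = length of the longest proper border of pat[:i+1]
--     fail = [0] * m
--     j = 0
--     for i in range(1, m):
--         while j and pat[i] != pat[j]:
--             j = fail[j - 1]
--         if pat[i] == pat[j]:
--             j += 1
--         fail[i] = j
--     # single left-to-right KMP scan, remembering where the last match ends
--     end = 0
--     j = 0
--     for i, c in enumerate(myString):
--         while j and c != pat[j]:
--             j = fail[j - 1]
--         if c == pat[j]:
--             j += 1
--         if j == m:
--             end = i + 1
--             j = fail[j - 1]
--     return myString[:end]
-- ===== Notes on version B (the rewrite author's own statement) =====
-- stated objective: alternative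
-- what changed: Replaced A's backward per-index scan with a slice comparison at each position by a single forward KMP pass (failure function + one scan remembering where the last match ends); it trades A's C-level slice comparisons for an O(n+m)-step Python-level scan, which is not measurably faster. Pre_ excludes only pat='' with len(myString)>=2, where A raises IndexError.
-- intended difference: When pat is a single character that occurs in myString only at index 0, A's loop stops at i=1 and misses the match ending at index 0, returning ''; B returns myString[:1] (= pat), the longest prefix ending with pat, which is the intended value. — e.g. on solution("a", "a"): A returns "", B returns "a"
import Mathlib
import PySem

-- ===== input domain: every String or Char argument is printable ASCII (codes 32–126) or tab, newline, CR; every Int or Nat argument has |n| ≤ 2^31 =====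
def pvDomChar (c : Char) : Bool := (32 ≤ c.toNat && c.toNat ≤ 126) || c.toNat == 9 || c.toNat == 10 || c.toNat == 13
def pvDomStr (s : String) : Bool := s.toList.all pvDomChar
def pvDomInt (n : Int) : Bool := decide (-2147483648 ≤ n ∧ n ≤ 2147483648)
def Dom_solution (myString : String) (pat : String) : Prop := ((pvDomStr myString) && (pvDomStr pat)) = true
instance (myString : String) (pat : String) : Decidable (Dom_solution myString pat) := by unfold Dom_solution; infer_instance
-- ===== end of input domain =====

-- B replaces A's backward per-index scan (a slice comparison at each position) by a single
-- forward KMP pass: failure function, then one scan keeping the end of the last match.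

-- ===== PORT A =====
-- A's loop 'for i in range(len(myString)-1, 0, -1)' with break: structural countdown over the
-- Python index i; argument 0 means the (empty-at-0) loop is exhausted, returning answer = ''.
def solutionLoopA (s p : List Char) : Nat → String
  | 0 => ""
  | i+1 =>
    if PySem.List.pyGet? p (-1) = PySem.List.pyGet? s ((i:Int)+1) ∧
       PySem.List.slice s (some ((i:Int)+1 - (PySem.List.len p) + 1)) (some ((i:Int)+1+1)) = p then
      String.ofList (PySem.List.slice s none (some ((i:Int)+1+1)))
    else
      solutionLoopA s p i

def solution (myString : String) (pat : String) : String :=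
  solutionLoopA myString.toList pat.toList (myString.toList.length - 1)

-- ===== PORT B =====
-- 'while j and c != pat[j]: j = fail[j-1]' — fuel = initial j suffices: every iteration strictly
-- decreases j (fail[j-1] ≤ j-1 for the tables B builds); the fuel-out arm is never reached then.
def kmpWhile (p : List Char) (F : List Nat) (c : Char) : Nat → Nat → Nat
  | _, 0 => 0
  | 0, j+1 => j+1
  | fuel+1, j+1 => if c = p.getD (j+1) ' ' then j+1 else kmpWhile p F c fuel (F.getD j 0)

-- the while loop followed by 'if c == pat[j]: j += 1' (pat[j] is always in range, so getD is exact)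
def kmpStep (p : List Char) (F : List Nat) (c : Char) (j : Nat) : Nat :=
  let w := kmpWhile p F c j j
  if c = p.getD w ' ' then w + 1 else w

-- one iteration of 'for i in range(1, m)': fail[i] = j after the step (i from pyRange is ≥ 1)
def kmpFailStep (p : List Char) (st : List Nat × Nat) (i : Int) : List Nat × Nat :=
  let j := kmpStep p st.1 (p.getD i.toNat ' ') st.2
  (st.1.set i.toNat j, j)

def kmpFail (p : List Char) : List Nat × Nat :=
  (PySem.List.pyRange 1 (p.length : Int) 1).foldl (kmpFailStep p) (List.replicate p.length 0, 0)

-- one iteration of 'for i, c in enumerate(myString)': state (end, j)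
def kmpScanStep (p : List Char) (F : List Nat) (m : Nat) (st : Int × Nat) (ic : Int × Char) : Int × Nat :=
  let j := kmpStep p F ic.2 st.2
  if j = m then (ic.1 + 1, F.getD (m-1) 0) else (st.1, j)

def solution_alt (myString : String) (pat : String) : String :=
  let p := pat.toList
  let m := p.length
  if m = 0 then ""
  else
    let F := (kmpFail p).1
    let r := (PySem.List.enumerate myString.toList 0).foldl (kmpScanStep p F m) (0, 0)
    String.ofList (PySem.List.slice myString.toList none (some r.1))

-- ===== PRECONDITION & SPEC =====
-- Pre_ excludes exactly the inputs on which A raises IndexError: pat = '' with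
-- len(myString) ≥ 2 (A's loop body evaluates pat[-1] on the empty pattern).
def Pre_solution (myString : String) (pat : String) : Prop :=
  pat.toList ≠ [] ∨ myString.toList.length < 2
instance (myString : String) (pat : String) : Decidable (Pre_solution myString pat) := by
  unfold Pre_solution; infer_instance

def pvWitness_solution : String × String := ("AbCAbC", "bC")

-- When pat is a single character occurring in myString only at index 0, A's loop stops at i=1
-- and misses the match ending at index 0, returning ''; B returns myString[:1] (= pat), the
-- longest prefix ending with pat, which is the intended value.
def D_solution (myString : String) (pat : String) : Prop :=
  pat.toList.length = 1 ∧ myString.toList.take 1 = pat.toList ∧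
    pat.toList.headD ' ' ∉ myString.toList.drop 1
instance (myString : String) (pat : String) : Decidable (D_solution myString pat) := by
  unfold D_solution; infer_instance

def Spec_solution (myString : String) (pat : String) (out : String) : Prop :=
  ¬ D_solution myString pat → out = solution_alt myString pat
instance (myString : String) (pat : String) (out : String) : Decidable (Spec_solution myString pat out) := by
  unfold Spec_solution; infer_instance

def pvDiffWitness_solution : String × String := ("a", "a")
def pvDiffWitnessOut_solution : String × String := ("", "a")

-- ===== CLAIM (what is proved, stated in full; the proofs are below) =====
def Claim_unchanged_solution : Prop := ∀ (myString : String) (pat : String), Dom_solution myString pat → Pre_solution myString pat → Spec_solution myString pat (solution myString pat)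
def Claim_changed_solution : Prop := Dom_solution (pvDiffWitness_solution.1) (pvDiffWitness_solution.2) ∧ Pre_solution (pvDiffWitness_solution.1) (pvDiffWitness_solution.2) ∧ D_solution (pvDiffWitness_solution.1) (pvDiffWitness_solution.2) ∧ solution (pvDiffWitness_solution.1) (pvDiffWitness_solution.2) = pvDiffWitnessOut_solution.1 ∧ solution_alt (pvDiffWitness_solution.1) (pvDiffWitness_solution.2) = pvDiffWitnessOut_solution.2 ∧ pvDiffWitnessOut_solution.1 ≠ pvDiffWitnessOut_solution.2
def Claim_exact_solution : Prop := ∀ (myString : String) (pat : String), Dom_solution myString pat → Pre_solution myString pat → D_solution myString pat → solution myString pat ≠ solution_alt myString pat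

-- ===== LEMMAS AND PROOFS =====

lemma suffix_of_suffix_le {u v w : List Char} (hu : u <:+ w) (hv : v <:+ w) (h : u.length ≤ v.length) : u <:+ v := by
  have hvw : v.length ≤ w.length := hv.length_le
  have hv' : v = w.drop (w.length - v.length) := List.suffix_iff_eq_drop.mp hv
  rw [List.suffix_iff_eq_drop]
  conv_lhs => rw [List.suffix_iff_eq_drop.mp hu]
  rw [hv', List.drop_drop]
  congr 1
  simp only [List.length_drop]
  omega

lemma snoc_suffix_snoc {u w : List Char} {a c : Char} : u ++ [a] <:+ w ++ [c] ↔ a = c ∧ u <:+ w := by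
  rw [← List.reverse_prefix]
  simp only [List.reverse_append, List.reverse_singleton, List.singleton_append, List.cons_prefix_cons]
  rw [List.reverse_prefix]

lemma take_suffix_snoc_iff {p W : List Char} {c : Char} {t : Nat} (h1 : 1 ≤ t) (h2 : t ≤ p.length) :
    (p.take t <:+ W ++ [c]) ↔ (p.getD (t-1) ' ' = c ∧ p.take (t-1) <:+ W) := by
  have ht : t - 1 < p.length := by omega
  have hsplit : p.take t = p.take (t-1) ++ [p.getD (t-1) ' '] := by
    have := List.take_succ_eq_append_getElem ht
    rw [show t - 1 + 1 = t by omega] at this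
    rw [this, List.getD_eq_getElem?_getD, List.getElem?_eq_getElem ht]
    rfl
  rw [hsplit, snoc_suffix_snoc]

def mbr (p W : List Char) (B : Nat) : Nat := Nat.findGreatest (fun t => p.take t <:+ W) B

lemma mbr_le (p W : List Char) (B : Nat) : mbr p W B ≤ B := Nat.findGreatest_le B
lemma le_mbr {p W : List Char} {t B : Nat} (h : t ≤ B) (hs : p.take t <:+ W) : t ≤ mbr p W B :=
  Nat.le_findGreatest h hs
lemma mbr_suffix (p W : List Char) (B : Nat) : p.take (mbr p W B) <:+ W := by
  rcases Nat.eq_zero_or_pos (mbr p W B) with h|h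
  · rw [h]; simp
  · exact ((Nat.findGreatest_eq_iff.mp (rfl : Nat.findGreatest (fun t => p.take t <:+ W) B = mbr p W B)).2.1 (Nat.pos_iff_ne_zero.mp h))

lemma findGreatest_congr {P Q : Nat → Prop} [DecidablePred P] [DecidablePred Q] :
    ∀ n : Nat, (∀ k, k ≤ n → (P k ↔ Q k)) → Nat.findGreatest P n = Nat.findGreatest Q n := by
  intro n
  induction n with
  | zero => intro _; simp
  | succ n ih =>
    intro h
    rw [Nat.findGreatest_succ, Nat.findGreatest_succ, if_congr (h _ le_rfl) rfl (ih fun k hk => h k (by omega))]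



-- if c ≠ p[j₀], the candidate j₀+1 is impossible, so the cap drops by one
lemma mbr_cap_drop {p : List Char} {c : Char} {j₀ : Nat} (hj : j₀ < p.length)
    (hc : c ≠ p.getD j₀ ' ') :
    mbr p (p.take j₀ ++ [c]) (j₀+1) = mbr p (p.take j₀ ++ [c]) j₀ := by
  unfold mbr
  rw [Nat.findGreatest_succ]
  rw [if_neg]
  intro hP
  have := (take_suffix_snoc_iff (by omega) (by omega)).mp hP
  simp only [Nat.add_sub_cancel] at this
  exact hc this.1.symm

-- shrinking the window from W (cap B) to its best border j₁ = mbr p W B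
lemma mbr_window {p W : List Char} {c : Char} {B : Nat} (hB : B < p.length) :
    mbr p (W ++ [c]) (B+1) = mbr p (p.take (mbr p W B) ++ [c]) (mbr p W B + 1) := by
  set j₁ := mbr p W B with hj₁
  have hj₁B : j₁ ≤ B := mbr_le p W B
  have hj₁W : p.take j₁ <:+ W := mbr_suffix p W B
  apply Nat.le_antisymm
  · set T := mbr p (W ++ [c]) (B+1) with hT
    rcases Nat.eq_zero_or_pos T with h0|h1
    · omega
    have hTs : p.take T <:+ W ++ [c] := mbr_suffix p (W ++ [c]) (B+1)
    have hTB : T ≤ B + 1 := mbr_le p (W ++ [c]) (B+1)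
    obtain ⟨hch, hts⟩ := (take_suffix_snoc_iff h1 (by omega)).mp hTs
    have hT1 : T - 1 ≤ j₁ := le_mbr (by omega) hts
    have hsub : p.take (T-1) <:+ p.take j₁ := by
      apply suffix_of_suffix_le hts hj₁W
      simp only [List.length_take]
      omega
    have : p.take T <:+ p.take j₁ ++ [c] := by
      rw [(take_suffix_snoc_iff h1 (by omega) : (p.take T <:+ p.take j₁ ++ [c]) ↔ _)]
      exact ⟨hch, hsub⟩
    exact le_mbr (by omega) this
  · set T := mbr p (p.take j₁ ++ [c]) (j₁+1) with hT
    have hTs : p.take T <:+ p.take j₁ ++ [c] := mbr_suffix _ _ _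
    have : p.take T <:+ W ++ [c] := by
      refine hTs.trans ?_
      obtain ⟨t, ht⟩ := hj₁W
      exact ⟨t, by rw [← List.append_assoc, ht]⟩
    have hTb : T ≤ j₁ + 1 := mbr_le _ _ _
    exact le_mbr (by omega) this

-- the while-then-if step computes the best border extension within the window p.take j₀
lemma kmpStep_eq (p : List Char) (F : List Nat) (c : Char) :
    ∀ j₀ : Nat, ∀ fuel : Nat, j₀ ≤ fuel → j₀ < p.length →
    (∀ k, k < j₀ → F.getD k 0 = mbr p (p.take (k+1)) k) →
    (if c = p.getD (kmpWhile p F c fuel j₀) ' ' then kmpWhile p F c fuel j₀ + 1 else kmpWhile p F c fuel j₀)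
      = mbr p (p.take j₀ ++ [c]) (j₀+1) := by
  intro j₀
  induction j₀ using Nat.strong_induction_on with
  | _ j₀ ih =>
    intro fuel hfuel hj hF
    match j₀ with
    | 0 =>
      have hw : kmpWhile p F c fuel 0 = 0 := by cases fuel <;> rfl
      rw [hw]
      have hP : (p.take 1 <:+ [] ++ [c]) ↔ (p.getD 0 ' ' = c ∧ p.take 0 <:+ ([] : List Char)) :=
        take_suffix_snoc_iff le_rfl (by omega)
      simp only [List.take_zero, List.nil_append, List.nil_suffix, and_true] at hP
      unfold mbr
      rw [Nat.findGreatest_succ, Nat.findGreatest_zero]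
      by_cases hc : c = p.getD 0 ' '
      · rw [if_pos hc, if_pos (by simpa [List.take_zero] using hP.mpr hc.symm)]
      · rw [if_neg hc, if_neg (by rw [List.take_zero]; exact fun h => hc ((hP.mp h).symm))]
    | j'+1 =>
      match fuel with
      | 0 => omega
      | fuel'+1 =>
        have hstep : kmpWhile p F c (fuel'+1) (j'+1)
            = if c = p.getD (j'+1) ' ' then j'+1 else kmpWhile p F c fuel' (F.getD j' 0) := rfl
        by_cases hc : c = p.getD (j'+1) ' '
        · rw [hstep, if_pos hc, if_pos hc]
          have hsplit : p.take (j'+1) ++ [c] = p.take (j'+2) := by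
            have := List.take_succ_eq_append_getElem (show j'+1 < p.length from hj)
            rw [this]
            congr 1
            rw [hc, List.getD_eq_getElem?_getD, List.getElem?_eq_getElem hj]
            rfl
          rw [hsplit]
          apply Nat.le_antisymm
          · exact le_mbr le_rfl (List.suffix_refl _)
          · exact mbr_le _ _ _
        · rw [hstep, if_neg hc]
          have hFj : F.getD j' 0 = mbr p (p.take (j'+1)) j' := hF j' (by omega)
          have hlt : F.getD j' 0 < j'+1 := by
            rw [hFj]; exact Nat.lt_succ_of_le (mbr_le _ _ _)
          have hrec := ih (F.getD j' 0) hlt fuel' (by omega) (by omega)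
            (fun k hk => hF k (by omega))
          rw [hrec]
          rw [mbr_cap_drop hj hc]
          have := mbr_window (p := p) (W := p.take (j'+1)) (c := c) (B := j') (by omega)
          rw [show j'+1 = j'+0+1 from rfl] at this ⊢
          rw [this, hFj]

-- one KMP character step advances the best-match window over W by c
lemma kmpStep_mbr (p W : List Char) (F : List Nat) (c : Char) (B : Nat) (hB : B < p.length)
    (hF : ∀ k, k < mbr p W B → F.getD k 0 = mbr p (p.take (k+1)) k) :
    kmpStep p F c (mbr p W B) = mbr p (W ++ [c]) (B+1) := by
  unfold kmpStep
  rw [mbr_window hB]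
  exact kmpStep_eq p F c (mbr p W B) (mbr p W B) le_rfl (by have := mbr_le p W B; omega) hF



lemma getD_replicate_zero (n k : Nat) : (List.replicate n (0:Nat)).getD k 0 = 0 := by
  rw [List.getD_eq_getElem?_getD, List.getElem?_replicate]
  split <;> rfl

lemma pyRange_self (a : Int) : PySem.List.pyRange a a 1 = [] := by
  have := PySem.List.pyRange_one_append a a a le_rfl le_rfl
  cases h : PySem.List.pyRange a a 1 with
  | nil => rfl
  | cons x xs =>
    rw [h] at this
    have := congrArg List.length this
    simp at this

lemma kmpFail_inv (p : List Char) :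
    ∀ i : Nat, 1 ≤ i → i ≤ p.length →
    (((PySem.List.pyRange 1 (i : Int) 1).foldl (kmpFailStep p) (List.replicate p.length 0, 0)).1.length = p.length) ∧
    (∀ k, k < i → ((PySem.List.pyRange 1 (i : Int) 1).foldl (kmpFailStep p) (List.replicate p.length 0, 0)).1.getD k 0 = mbr p (p.take (k+1)) k) ∧
    (∀ k, i ≤ k → ((PySem.List.pyRange 1 (i : Int) 1).foldl (kmpFailStep p) (List.replicate p.length 0, 0)).1.getD k 0 = 0) ∧
    (((PySem.List.pyRange 1 (i : Int) 1).foldl (kmpFailStep p) (List.replicate p.length 0, 0)).2 = mbr p (p.take i) (i-1)) := by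
  intro i
  induction i with
  | zero => omega
  | succ i ih =>
    intro h1 h2
    rcases Nat.eq_zero_or_pos i with hi0 | hi1
    · subst hi0
      rw [show ((1:Nat) : Int) = 1 by norm_num, pyRange_self]
      simp only [List.foldl_nil]
      refine ⟨by simp, ?_, fun k _ => getD_replicate_zero _ _, ?_⟩
      · intro k hk
        have : k = 0 := by omega
        subst this
        rw [getD_replicate_zero]
        unfold mbr
        rw [Nat.findGreatest_zero]
      · unfold mbr
        rw [Nat.findGreatest_zero]
    · obtain ⟨hlen, hdone, hzero, hj⟩ := ih hi1 (by omega)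
      have hrange : PySem.List.pyRange 1 ((i+1 : Nat) : Int) 1 = PySem.List.pyRange 1 (i : Int) 1 ++ [(i : Int)] := by
        rw [show ((i+1 : Nat) : Int) = (i : Int) + 1 by push_cast; ring]
        exact PySem.List.pyRange_one_succ_right (by exact_mod_cast hi1)
      rw [hrange, List.foldl_append, List.foldl_cons, List.foldl_nil]
      set st := (PySem.List.pyRange 1 (i : Int) 1).foldl (kmpFailStep p) (List.replicate p.length 0, 0) with hst
      have htoNat : ((i : Int)).toNat = i := by simp
      have hi_lt : i < p.length := by omega
      have hstep : kmpStep p st.1 (p.getD i ' ') st.2 = mbr p (p.take (i+1)) i := by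
        rw [hj]
        have hGB : i - 1 < p.length := by omega
        have := kmpStep_mbr p (p.take i) st.1 (p.getD i ' ') (i-1) hGB
          (fun k hk => hdone k (by have := mbr_le p (p.take i) (i-1); omega))
        rw [show i - 1 + 1 = i by omega] at this
        rw [this]
        congr 1
        have hts := List.take_succ_eq_append_getElem hi_lt
        rw [hts]
        congr 1
        rw [List.getD_eq_getElem?_getD, List.getElem?_eq_getElem hi_lt]
        rfl
      unfold kmpFailStep
      simp only [htoNat, hstep]
      refine ⟨by simp [hlen], ?_, ?_, by simp [Nat.add_sub_cancel]⟩
      · intro k hk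
        rcases Nat.lt_or_ge k i with hki | hki
        · have : (st.1.set i (mbr p (p.take (i+1)) i)).getD k 0 = st.1.getD k 0 := by
            simp [List.getD_eq_getElem?_getD, List.getElem?_set_ne (by omega : i ≠ k)]
          rw [this]; exact hdone k hki
        · have : k = i := by omega
          subst this
          simp [List.getD_eq_getElem?_getD, List.getElem?_set_self, hlen, hi_lt]
      · intro k hk
        have : (st.1.set i (mbr p (p.take (i+1)) i)).getD k 0 = st.1.getD k 0 := by
          simp [List.getD_eq_getElem?_getD, List.getElem?_set_ne (by omega : i ≠ k)]
        rw [this]; exact hzero k (by omega)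

lemma kmpFail_spec (p : List Char) (hp : p ≠ []) :
    ∀ k, k < p.length → (kmpFail p).1.getD k 0 = mbr p (p.take (k+1)) k := by
  have h1 : 1 ≤ p.length := List.length_pos_iff.mpr hp
  have := kmpFail_inv p p.length h1 le_rfl
  exact this.2.1


lemma take_length_self (p : List Char) : p.take p.length = p := List.take_length

lemma scan_inv (p : List Char) (hp : p ≠ []) (F : List Nat)
    (hF : ∀ k, k < p.length → F.getD k 0 = mbr p (p.take (k+1)) k) :
    ∀ s : List Char,
    (PySem.List.enumerate s 0).foldl (kmpScanStep p F p.length) (0, 0) =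
      ((Nat.findGreatest (fun e => p <:+ s.take e) s.length : Int), mbr p s (p.length - 1)) := by
  have hm1 : 1 ≤ p.length := List.length_pos_iff.mpr hp
  intro s
  induction s using List.reverseRecOn with
  | nil =>
    simp only [PySem.List.enumerate_nil, List.foldl_nil, List.length_nil, Nat.findGreatest_zero]
    have h0 : mbr p [] (p.length - 1) = 0 := by
      unfold mbr
      rw [Nat.findGreatest_eq_zero_iff]
      intro n hn _ hP
      rcases List.take_eq_nil_iff.mp (List.suffix_nil.mp hP) with h|h
      · omega
      · exact hp h
    rw [h0]
    norm_num
  | append_singleton s c ih =>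
    rw [PySem.List.enumerate_append, List.foldl_append, ih]
    have he : PySem.List.enumerate [c] ((0:Int) + (s.length : Int)) = [(((s.length : Nat) : Int), c)] := by
      simp [PySem.List.enumerate_cons, PySem.List.enumerate_nil]
    rw [he, List.foldl_cons, List.foldl_nil]
    unfold kmpScanStep
    have hstep : kmpStep p F c (mbr p s (p.length - 1)) = mbr p (s ++ [c]) p.length := by
      have := kmpStep_mbr p s F c (p.length - 1) (by omega)
        (fun k hk => hF k (by have := mbr_le p s (p.length - 1); omega))
      rw [show p.length - 1 + 1 = p.length by omega] at this
      exact this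
    simp only [hstep]
    by_cases hj : mbr p (s ++ [c]) p.length = p.length
    · rw [if_pos hj]
      have hsuf : p <:+ s ++ [c] := by
        have := mbr_suffix p (s ++ [c]) p.length
        rw [hj, take_length_self] at this
        exact this
      have hlen : (s ++ [c]).length = s.length + 1 := by simp
      simp only [Prod.mk.injEq]
      constructor
      · have hfg : Nat.findGreatest (fun e => p <:+ (s ++ [c]).take e) ((s ++ [c]).length) = s.length + 1 := by
          rw [hlen]
          apply Nat.le_antisymm
          · exact Nat.findGreatest_le _
          · apply Nat.le_findGreatest le_rfl
            rw [show (s ++ [c]).take (s.length + 1) = s ++ [c] from by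
              rw [← hlen]; exact take_length_self _]
            exact hsuf
        rw [hfg]
        push_cast
        ring
      · rw [hF (p.length - 1) (by omega), show p.length - 1 + 1 = p.length by omega, take_length_self]
        apply Nat.le_antisymm
        · exact le_mbr (mbr_le _ _ _) ((mbr_suffix p p (p.length - 1)).trans hsuf)
        · have ht' : p.take (mbr p (s ++ [c]) (p.length - 1)) <:+ p := by
            apply suffix_of_suffix_le (mbr_suffix p (s ++ [c]) (p.length - 1)) hsuf
            simp only [List.length_take]
            have := mbr_le p (s ++ [c]) (p.length - 1)
            omega
          exact le_mbr (mbr_le _ _ _) ht'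
    · rw [if_neg hj]
      have hnp : ¬ (p.take p.length <:+ s ++ [c]) := by
        rw [take_length_self]
        intro h
        exact hj (Nat.le_antisymm (mbr_le _ _ _)
          (by rw [← take_length_self p] at h; exact le_mbr le_rfl h))
      have hlen : (s ++ [c]).length = s.length + 1 := by simp
      simp only [Prod.mk.injEq]
      constructor
      · have hnp' : ¬ (p <:+ (s ++ [c]).take (s.length + 1)) := by
          rw [show (s ++ [c]).take (s.length + 1) = s ++ [c] from by
            rw [← hlen]; exact take_length_self _]
          rw [take_length_self] at hnp
          exact hnp
        rw [hlen, Nat.findGreatest_succ, if_neg hnp']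
        congr 1
        apply findGreatest_congr
        intro k hk
        rw [List.take_append_of_le_length hk]
      · have hsucc := Nat.findGreatest_succ (P := fun t => p.take t <:+ (s ++ [c])) (p.length - 1)
        rw [show p.length - 1 + 1 = p.length by omega] at hsucc
        unfold mbr
        rw [hsucc, if_neg hnp]



abbrev matchEnd (s p : List Char) (i : Nat) : Prop :=
  p.length ≤ i + 1 ∧ (s.drop (i + 1 - p.length)).take p.length = p

def bestEnd (s p : List Char) : Nat → Option Nat
  | 0 => if matchEnd s p 0 then some 0 else none
  | j+1 => if matchEnd s p (j+1) then some (j+1) else bestEnd s p j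

lemma condA_iff (s p : List Char) (hp : p ≠ []) (i : Nat) (hi : i + 1 < s.length) :
    (PySem.List.pyGet? p (-1) = PySem.List.pyGet? s ((i:Int)+1) ∧
     PySem.List.slice s (some ((i:Int)+1 - (PySem.List.len p) + 1)) (some ((i:Int)+1+1)) = p)
    ↔ matchEnd s p (i+1) := by
  have hm1 : 1 ≤ p.length := List.length_pos_iff.mpr hp
  by_cases hcase : p.length ≤ i + 2
  · have hstart : ((i:Int)+1 - (PySem.List.len p) + 1) = ((i + 2 - p.length : Nat) : Int) := by
      simp [PySem.List.len_eq]; omega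
    have hstop : ((i:Int)+1+1) = ((i + 2 : Nat) : Int) := by push_cast; ring
    rw [hstart, hstop, PySem.List.slice_natCast]
    have hdt : i + 2 - (i + 2 - p.length) = p.length := by omega
    rw [hdt]
    constructor
    · rintro ⟨-, h2⟩
      exact ⟨by omega, by simpa [show i + 1 + 1 - p.length = i + 2 - p.length from rfl] using h2⟩
    · rintro ⟨-, h2⟩
      have h2' : (s.drop (i + 2 - p.length)).take p.length = p := by
        simpa [show i + 1 + 1 - p.length = i + 2 - p.length from rfl] using h2
      refine ⟨?_, h2'⟩
      rw [PySem.List.pyGet?_neg_one]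
      have hcast : ((i:Int)+1) = ((i+1 : Nat) : Int) := by push_cast; ring
      rw [hcast, PySem.List.pyGet?_natCast]
      have hlen : ((s.drop (i + 2 - p.length)).take p.length).length = p.length := by
        simp [List.length_take, List.length_drop]; omega
      have hidx : i + 2 - p.length + (p.length - 1) = i + 1 := by omega
      have hgl : p.getLast? = p[p.length - 1]? := by
        rw [List.getLast?_eq_getElem?]
      rw [hgl, ← h2']
      rw [List.getElem?_take_of_lt (by omega)]
      rw [List.getElem?_drop, hlen, hidx]
  · constructor
    · rintro ⟨-, h2⟩
      exfalso
      have hlen := congrArg List.length h2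
      rw [PySem.List.length_slice] at hlen
      have hc1 : PySem.List.clampIdx s.length ((i:Int)+1+1) = i + 2 := by
        have : ((i:Int)+1+1) = ((i + 2 : Nat) : Int) := by push_cast; ring
        rw [this, PySem.List.clampIdx_natCast]; omega
      have hc2 : PySem.List.clampIdx s.length ((i:Int)+1 - (PySem.List.len p) + 1)
          = s.length - (p.length - (i + 2)) := by
        have : ((i:Int)+1 - (PySem.List.len p) + 1) = -((p.length - (i + 2) : Nat) : Int) := by
          simp [PySem.List.len_eq]; omega
        rw [this, PySem.List.clampIdx_neg_natCast _ _ (by omega)]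
      rw [hc1, hc2] at hlen
      omega
    · rintro ⟨h1, -⟩; omega

lemma loopA_eq_bestEnd (s p : List Char) (hp : p ≠ []) :
    ∀ j, j < s.length →
      solutionLoopA s p j =
        (match bestEnd s p j with
         | some (i+1) => String.ofList (s.take (i+2))
         | _ => "") := by
  intro j
  induction j with
  | zero =>
    intro _
    simp only [solutionLoopA, bestEnd]
    split_ifs <;> rfl
  | succ k ih =>
    intro hlt
    simp only [solutionLoopA, bestEnd]
    by_cases hc : matchEnd s p (k+1)
    · rw [if_pos ((condA_iff s p hp k hlt).mpr hc), if_pos hc]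
      have : PySem.List.slice s none (some ((k:Int)+1+1)) = s.take (k+2) := by
        have : ((k:Int)+1+1) = ((k + 2 : Nat) : Int) := by push_cast; ring
        rw [this, PySem.List.slice_to_natCast]
      rw [this]
    · rw [if_neg (fun h => hc ((condA_iff s p hp k hlt).mp h)), if_neg hc]
      exact ih (by omega)

lemma matchEnd_iff_suffix (s p : List Char) (i : Nat) (hi : i + 1 ≤ s.length) :
    matchEnd s p i ↔ p <:+ s.take (i+1) := by
  have hlt : (s.take (i+1)).length = i + 1 := by
    rw [List.length_take]; omega
  constructor
  · rintro ⟨h1, h2⟩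
    have key : (s.drop (i+1-p.length)).take p.length = (s.take (i+1)).drop (i+1-p.length) := by
      rw [List.take_drop, show i+1-p.length + p.length = i+1 from by omega]
    rw [List.suffix_iff_eq_drop, hlt, ← key, h2]
  · intro h
    have h1 : p.length ≤ i + 1 := by
      have := h.length_le; rw [hlt] at this; exact this
    have key : (s.drop (i+1-p.length)).take p.length = (s.take (i+1)).drop (i+1-p.length) := by
      rw [List.take_drop, show i+1-p.length + p.length = i+1 from by omega]
    refine ⟨h1, ?_⟩
    have h2 := List.suffix_iff_eq_drop.mp h
    rw [hlt] at h2
    rw [key, ← h2]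

lemma bestEnd_eq_findGreatest (s p : List Char) :
    ∀ j, j < s.length →
    bestEnd s p j = (match Nat.findGreatest (fun e => p <:+ s.take e) (j+1) with
                     | 0 => none
                     | Nat.succ e => some e) := by
  intro j
  induction j with
  | zero =>
    intro hj
    simp only [bestEnd]
    rw [Nat.findGreatest_succ, Nat.findGreatest_zero]
    rw [if_congr (matchEnd_iff_suffix s p 0 (by omega)) rfl rfl]
    by_cases h : p <:+ s.take 1
    · rw [if_pos h, if_pos h]
    · rw [if_neg h, if_neg h]
  | succ k ih =>
    intro hj
    simp only [bestEnd]
    rw [Nat.findGreatest_succ]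
    rw [if_congr (matchEnd_iff_suffix s p (k+1) (by omega)) rfl rfl]
    by_cases h : p <:+ s.take (k+2)
    · rw [if_pos h, if_pos (show p <:+ s.take (k+1+1) from h)]
    · rw [if_neg h, if_neg (show ¬ p <:+ s.take (k+1+1) from h), ih (by omega)]

-- E = 1 (the best match ends at index 0) is exactly the D_ condition
lemma D_iff_E_one (s p : List Char) (hp : p ≠ []) :
    (p.length = 1 ∧ s.take 1 = p ∧ p.headD ' ' ∉ s.drop 1) ↔
    Nat.findGreatest (fun e => p <:+ s.take e) s.length = 1 := by
  constructor
  · rintro ⟨h1, h2, h3⟩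
    obtain ⟨a, rfl⟩ := List.length_eq_one_iff.mp h1
    have hs : s ≠ [] := by
      intro h; rw [h] at h2; exact hp h2.symm
    have hn : 1 ≤ s.length := List.length_pos_iff.mpr hs
    rw [Nat.findGreatest_eq_iff]
    refine ⟨hn, fun _ => by rw [← h2], ?_⟩
    intro t h1t htn hP
    have hdec : s.take t = s.take (t-1) ++ [s[t-1]'(by omega)] := by
      have := List.take_succ_eq_append_getElem (show t-1 < s.length by omega)
      rw [show t - 1 + 1 = t by omega] at this
      exact this
    rw [hdec, show ([a] : List Char) = [] ++ [a] from rfl] at hP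
    obtain ⟨ha, -⟩ := snoc_suffix_snoc.mp hP
    apply h3
    rw [List.headD_cons, ha]
    have : (s.drop 1)[t-2]'(by simp [List.length_drop]; omega) = s[t-1]'(by omega) := by
      rw [List.getElem_drop]
      congr 1
      omega
    rw [← this]
    exact List.getElem_mem _
  · intro hE
    obtain ⟨hn1, hP1, hmax⟩ := Nat.findGreatest_eq_iff.mp hE
    have hP1' : p <:+ s.take 1 := hP1 one_ne_zero
    have hlen1 : (s.take 1).length ≤ 1 := by simp [List.length_take]
    have hm1 : p.length = 1 := by
      have h1 := hP1'.length_le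
      have h2 : 1 ≤ p.length := List.length_pos_iff.mpr hp
      omega
    have heq : p = s.take 1 := hP1'.eq_of_length (by
      simp only [List.length_take]
      omega)
    refine ⟨hm1, heq.symm, ?_⟩
    obtain ⟨a, rfl⟩ := List.length_eq_one_iff.mp hm1
    rw [List.headD_cons]
    intro hmem
    obtain ⟨k, hk, hka⟩ := List.mem_iff_getElem.mp hmem
    have hkn : k + 1 < s.length := by
      simp only [List.length_drop] at hk; omega
    refine hmax (n := k + 2) (by omega) (by omega) ?_
    have hdec : s.take (k+2) = s.take (k+1) ++ [s[k+1]] := List.take_succ_eq_append_getElem hkn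
    rw [hdec, show ([a] : List Char) = [] ++ [a] from rfl]
    refine snoc_suffix_snoc.mpr ⟨?_, List.nil_suffix⟩
    rw [← hka, List.getElem_drop]
    congr 1
    omega

-- B's value, expressed through the scan invariant
lemma solution_alt_eq (myString pat : String) (hp : pat.toList ≠ []) :
    solution_alt myString pat =
      String.ofList (myString.toList.take
        (Nat.findGreatest (fun e => pat.toList <:+ myString.toList.take e) myString.toList.length)) := by
  unfold solution_alt
  rw [if_neg (by simpa using List.length_pos_iff.mpr hp |>.ne')]
  dsimp only
  rw [scan_inv pat.toList hp (kmpFail pat.toList).1 (kmpFail_spec pat.toList hp) myString.toList]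
  rw [PySem.List.slice_to_natCast]

-- ===== VERDICT (by name: the statements are the Claim_ definitions above) =====
theorem solution_spec : Claim_unchanged_solution := by
  intro myString pat _ hpre hnd
  show solution myString pat = solution_alt myString pat
  by_cases hpe : pat.toList = []
  · have hlen : myString.toList.length < 2 := by
      rcases hpre with h | h
      · exact absurd hpe h
      · exact h
    unfold solution solution_alt
    rw [hpe]
    rw [show myString.toList.length - 1 = 0 by omega]
    rfl
  · rw [solution_alt_eq myString pat hpe]
    unfold solution
    set s := myString.toList with hs
    set p := pat.toList with hpdef
    by_cases hn : s.length = 0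
    · rw [show s.length - 1 = 0 by omega]
      have hse : s = [] := List.length_eq_zero_iff.mp hn
      rw [hse]
      simp only [solutionLoopA, List.length_nil, Nat.findGreatest_zero, List.take_nil]
    · have hlt : s.length - 1 < s.length := by omega
      rw [loopA_eq_bestEnd s p hpe (s.length - 1) hlt,
          bestEnd_eq_findGreatest s p (s.length - 1) hlt,
          show s.length - 1 + 1 = s.length by omega]
      cases hE : Nat.findGreatest (fun e => p <:+ s.take e) s.length with
      | zero => rfl
      | succ e =>
        cases e with
        | zero =>
          exfalso
          apply hnd
          unfold D_solution
          exact (D_iff_E_one s p hpe).mpr hE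
        | succ e' => rfl

theorem solution_changed : Claim_changed_solution := by
  unfold Claim_changed_solution; decide

theorem solution_tight : Claim_exact_solution := by
  intro myString pat _ _ hD
  obtain ⟨h1, h2, h3⟩ := hD
  set s := myString.toList with hs
  set p := pat.toList with hpdef
  have hp : p ≠ [] := by
    intro h; rw [h] at h1; simp at h1
  have hsne : s ≠ [] := by
    intro h
    rw [h] at h2
    exact hp h2.symm
  have hn : 1 ≤ s.length := List.length_pos_iff.mpr hsne
  have hE : Nat.findGreatest (fun e => p <:+ s.take e) s.length = 1 :=
    (D_iff_E_one s p hp).mp ⟨h1, h2, h3⟩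
  have hA : solution myString pat = "" := by
    unfold solution
    rw [loopA_eq_bestEnd s p hp (s.length - 1) (by omega),
        bestEnd_eq_findGreatest s p (s.length - 1) (by omega),
        show s.length - 1 + 1 = s.length by omega, hE]
  have hB : solution_alt myString pat = String.ofList p := by
    rw [solution_alt_eq myString pat hp, ← hpdef, ← hs, hE, h2]
  rw [hA, hB]
  intro heq
  have := congrArg String.toList heq
  rw [String.toList_ofList] at this
  exact hp (by simpa using this.symm)
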